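-- pv_equiv track=rewrite | github.com/sanskrit-lexicon/BOP | issues/issue6/cdsl/cmp/cmp_misc1.py | write_changes_1_helper
-- ===== SOURCE A (Python) =====
-- def write_changes_1_helper(list1,list2):
--  n1 = len(list1)
--  n2 = len(list2)
--  arr = []
--  ndiff = 0
--  nmax = max(n1,n2)
--  for i in range(nmax):
--   if i < n1:
--    a1 = list1[i]
--   else:
--    a1 = 'NA'
--   if i < n2:
--    a2 = list2[i]
--   else:
--    a2 = 'NA'
--   if a1 == a2:
--    flag = 'EQ'
--   else:
--    flag = 'NEQ'
--   if flag == 'NEQ':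
--    ndiff = ndiff + 1
--   if (ndiff == 1) and (flag == 'NEQ'):
--    flag = 'NE1'
--    index_first_diff = i
--   #out = '%s %s %s %s' %(i+1,a1,flag,a2)
--   arr.append((a1,a2,flag))
--  return arr,index_first_diff
-- ===== SOURCE B (Python) =====
-- def write_changes_1_helper(list1, list2):
--     # Phase 1: pad both lists with 'NA' to equal length, build flagged triples in one comprehension.
--     m = max(len(list1), len(list2))
--     p1 = list1 + ['NA'] * (m - len(list1))
--     p2 = list2 + ['NA'] * (m - len(list2))
--     arr = [(a1, a2, 'EQ' if a1 == a2 else 'NEQ') for a1, a2 in zip(p1, p2)]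
--     # Phase 2: find the first mismatch and relabel it 'NE1'.
--     index_first_diff = [i for i, t in enumerate(arr) if t[2] == 'NEQ'][0]
--     a1, a2, _ = arr[index_first_diff]
--     arr[index_first_diff] = (a1, a2, 'NE1')
--     return arr, index_first_diff
-- ===== Notes on version B (the rewrite author's own statement) =====
-- stated objective: simpler
-- what changed: Replaces A's single stateful loop (running ndiff counter, inline relabelling, conditional index assignment) with two phases: a comprehension over the zipped NA-padded lists building EQ/NEQ triples, then a scan that finds the first NEQ and relabels it NE1.
import Mathlib
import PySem

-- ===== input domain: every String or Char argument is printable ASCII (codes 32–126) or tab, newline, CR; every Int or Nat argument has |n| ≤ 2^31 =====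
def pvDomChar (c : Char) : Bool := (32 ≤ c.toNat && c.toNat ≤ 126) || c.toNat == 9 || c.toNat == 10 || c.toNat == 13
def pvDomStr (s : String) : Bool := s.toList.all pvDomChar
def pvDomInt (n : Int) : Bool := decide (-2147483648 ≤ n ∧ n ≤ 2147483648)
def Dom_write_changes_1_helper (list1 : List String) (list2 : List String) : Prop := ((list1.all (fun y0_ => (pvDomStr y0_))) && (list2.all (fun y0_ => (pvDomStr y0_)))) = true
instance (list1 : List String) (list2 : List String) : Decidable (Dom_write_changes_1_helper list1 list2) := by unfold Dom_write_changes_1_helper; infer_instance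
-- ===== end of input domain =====

-- B replaces A's single stateful loop with two phases (build the flagged pairs, then relabel the
-- first mismatch): a simpler decomposition at the same O(n) cost.  Where A raises
-- UnboundLocalError (no mismatch) B raises IndexError; Pre_ excludes exactly those inputs.

-- ===== PORT A =====
-- A's single loop over range(max(n1,n2)); the per-iteration state is (arr, ndiff, index_first_diff),
-- where index_first_diff is Option Int because Python leaves the variable unassigned until the first
-- 'NEQ'; if it is still unassigned at the return, Python raises UnboundLocalError (excluded by
-- Pre_), and the port returns 0 there.
def write_changes_1_helper (list1 : List String) (list2 : List String) : (List (String × String × String)) × Int :=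
  let n1 : Int := (list1.length : Int)
  let n2 : Int := (list2.length : Int)
  let nmax : Int := max n1 n2
  let st := (PySem.List.pyRange 0 nmax 1).foldl
    (fun (st : List (String × String × String) × Int × Option Int) i =>
      let arr := st.1
      let ndiff := st.2.1
      let ifd := st.2.2
      let a1 := if i < n1 then PySem.List.pyGetD list1 i "" else "NA"
      let a2 := if i < n2 then PySem.List.pyGetD list2 i "" else "NA"
      let flag := if a1 == a2 then ("EQ" : String) else "NEQ"
      let ndiff := if flag == "NEQ" then ndiff + 1 else ndiff
      let p := if ndiff == 1 && flag == "NEQ" then (("NE1" : String), some i) else (flag, ifd)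
      (arr ++ [(a1, a2, p.1)], ndiff, p.2))
    ([], 0, none)
  (st.1, (st.2.2).getD 0)

-- ===== PORT B =====
-- Phase 1 of Source B: pad both lists with 'NA', zip, one comprehension of flagged triples.
-- Phase 2: first index whose flag is 'NEQ' (the match on the filtered list is Source B's `[...][0]`,
-- which raises IndexError when it is empty — excluded by Pre_; the port returns 0 there),
-- then relabel that triple 'NE1'.
def write_changes_1_helper_alt (list1 : List String) (list2 : List String) : (List (String × String × String)) × Int :=
  let m : Nat := max list1.length list2.length
  let p1 := list1 ++ List.replicate (m - list1.length) "NA"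
  let p2 := list2 ++ List.replicate (m - list2.length) "NA"
  let arr := (p1.zip p2).map (fun p => (p.1, p.2, if p.1 == p.2 then ("EQ" : String) else "NEQ"))
  match arr.zipIdx.filter (fun t => t.1.2.2 == "NEQ") with
  | [] => (arr, 0)
  | ((a1, a2, _), i) :: _ => (arr.set i (a1, a2, "NE1"), (i : Int))

-- ===== PRECONDITION & SPEC =====
-- Pre_ excludes exactly the inputs on which the NA-padded lists are elementwise equal: there A
-- raises UnboundLocalError (index_first_diff never assigned) and B raises IndexError, so neither
-- program returns a value.
def Pre_write_changes_1_helper (list1 : List String) (list2 : List String) : Prop :=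
  (((list1 ++ List.replicate (max list1.length list2.length - list1.length) "NA").zip
    (list2 ++ List.replicate (max list1.length list2.length - list2.length) "NA")).any
      (fun p => p.1 != p.2)) = true
instance (list1 : List String) (list2 : List String) : Decidable (Pre_write_changes_1_helper list1 list2) := by unfold Pre_write_changes_1_helper; infer_instance
def pvWitness_write_changes_1_helper : List String × List String := (["a", "b"], ["a", "c"])
def Spec_write_changes_1_helper (list1 : List String) (list2 : List String) (out : (List (String × String × String)) × Int) : Prop := out = write_changes_1_helper_alt list1 list2
instance (list1 : List String) (list2 : List String) (out : (List (String × String × String)) × Int) : Decidable (Spec_write_changes_1_helper list1 list2 out) := by unfold Spec_write_changes_1_helper; infer_instance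

-- ===== CLAIM (what is proved, stated in full; the proofs are below) =====
def Claim_equal_write_changes_1_helper : Prop := ∀ (list1 : List String) (list2 : List String), Dom_write_changes_1_helper list1 list2 → Pre_write_changes_1_helper list1 list2 → Spec_write_changes_1_helper list1 list2 (write_changes_1_helper list1 list2)

-- ===== LEMMAS AND PROOFS =====

-- A's loop body as a named function (definitionally equal to the lambda inside the port A).
def bodyA (list1 list2 : List String)
    (st : List (String × String × String) × Int × Option Int) (i : Int) :
    List (String × String × String) × Int × Option Int :=
  let arr := st.1
  let ndiff := st.2.1
  let ifd := st.2.2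
  let a1 := if i < (list1.length : Int) then PySem.List.pyGetD list1 i "" else "NA"
  let a2 := if i < (list2.length : Int) then PySem.List.pyGetD list2 i "" else "NA"
  let flag := if a1 == a2 then ("EQ" : String) else "NEQ"
  let ndiff := if flag == "NEQ" then ndiff + 1 else ndiff
  let p := if ndiff == 1 && flag == "NEQ" then (("NE1" : String), some i) else (flag, ifd)
  (arr ++ [(a1, a2, p.1)], ndiff, p.2)

-- A's loop, re-expressed as structural recursion over the zipped padded pairs with a position
-- counter k (proved to agree with the pyRange fold in foldA_eq_goA).
def goA : List (String × String) → List (String × String × String) → Int → Option Int →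
    Nat → List (String × String × String) × Int × Option Int
  | [], arr, nd, ifd, _ => (arr, nd, ifd)
  | (a, b) :: rest, arr, nd, ifd, k =>
      let flag := if a == b then ("EQ" : String) else "NEQ"
      let nd' := if flag == "NEQ" then nd + 1 else nd
      let p := if nd' == 1 && flag == "NEQ" then (("NE1" : String), some (k : Int)) else (flag, ifd)
      goA rest (arr ++ [(a, b, p.1)]) nd' p.2 (k + 1)

def mapFlag (l : List (String × String)) : List (String × String × String) :=
  l.map (fun p => (p.1, p.2, if p.1 == p.2 then ("EQ" : String) else "NEQ"))

def pad (l : List String) (M : Nat) : List String := l ++ List.replicate (M - l.length) "NA"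

lemma pad_length (l : List String) (M : Nat) (h : l.length ≤ M) : (pad l M).length = M := by
  simp [pad]; omega

lemma pad_get (l : List String) (M k : Nat) (hl : l.length ≤ M) (hk : k < M) :
    (if (k : Int) < (l.length : Int) then PySem.List.pyGetD l (k : Int) "" else "NA")
      = (pad l M)[k]'(by rw [pad_length l M hl]; exact hk) := by
  by_cases hkl : k < l.length
  · rw [if_pos (by exact_mod_cast hkl), PySem.List.pyGetD_natCast,
      List.getD_eq_getElem l "" hkl]
    simp [pad, hkl]
  · rw [if_neg (by exact_mod_cast hkl)]
    simp [pad, List.getElem_append, hkl]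

lemma fold_aux (list1 list2 : List String) :
    ∀ (n k : Nat) (arr : List (String × String × String)) (nd : Int) (ifd : Option Int),
    k + n = max list1.length list2.length →
    (List.range' k n).foldl (fun st (j : Nat) => bodyA list1 list2 st (j : Int)) (arr, nd, ifd)
      = goA (((pad list1 (max list1.length list2.length)).zip
              (pad list2 (max list1.length list2.length))).drop k) arr nd ifd k := by
  intro n
  induction n with
  | zero =>
      intro k arr nd ifd hk
      have hd : (((pad list1 (max list1.length list2.length)).zip
          (pad list2 (max list1.length list2.length))).drop k) = [] := by
        apply List.drop_eq_nil_of_le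
        rw [List.length_zip, pad_length _ _ (Nat.le_max_left _ _),
          pad_length _ _ (Nat.le_max_right _ _)]
        omega
      rw [hd]
      simp [goA, List.range'_zero]
  | succ n ih =>
      intro k arr nd ifd hk
      have hklt : k < (((pad list1 (max list1.length list2.length)).zip
          (pad list2 (max list1.length list2.length)))).length := by
        rw [List.length_zip, pad_length _ _ (Nat.le_max_left _ _),
          pad_length _ _ (Nat.le_max_right _ _)]
        omega
      rw [List.range'_succ, List.foldl_cons, List.drop_eq_getElem_cons hklt]
      simp only [List.getElem_zip]
      simp only [goA, bodyA]
      rw [← pad_get list1 _ k (Nat.le_max_left _ _) (by omega),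
        ← pad_get list2 _ k (Nat.le_max_right _ _) (by omega)]
      exact ih (k + 1) _ _ _ (by omega)

lemma foldA_eq_goA (list1 list2 : List String) :
    write_changes_1_helper list1 list2 =
      ((goA ((pad list1 (max list1.length list2.length)).zip
             (pad list2 (max list1.length list2.length))) [] 0 none 0).1,
       ((goA ((pad list1 (max list1.length list2.length)).zip
              (pad list2 (max list1.length list2.length))) [] 0 none 0).2.2).getD 0) := by
  have h0 : write_changes_1_helper list1 list2 =
      (let st := (PySem.List.pyRange 0 (max (list1.length : Int) (list2.length : Int)) 1).foldl
        (bodyA list1 list2) ([], 0, none)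
       (st.1, (st.2.2).getD 0)) := rfl
  rw [h0]
  rw [show (max (list1.length : Int) (list2.length : Int))
      = ((max list1.length list2.length : Nat) : Int) from (Nat.cast_max _ _).symm]
  rw [PySem.List.pyRange_zero_natCast, List.foldl_map, List.range_eq_range']
  have h1 := fold_aux list1 list2 (max list1.length list2.length) 0 [] 0 none (by omega)
  rw [List.drop_zero] at h1
  rw [h1]

lemma goA_prefix (u rest : List (String × String)) (arr : List (String × String × String)) (k : Nat)
    (h : ∀ p ∈ u, p.1 = p.2) :
    goA (u ++ rest) arr 0 none k = goA rest (arr ++ mapFlag u) 0 none (k + u.length) := by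
  induction u generalizing arr k with
  | nil => simp [mapFlag]
  | cons x xs ih =>
      obtain ⟨a, b⟩ := x
      have hab : a = b := h (a, b) (by simp)
      simp only [List.cons_append, goA, hab, beq_self_eq_true, if_true,
        show (("EQ" : String) == "NEQ") = false from by decide, Bool.false_eq_true, if_false,
        show ((0 : Int) == 1) = false from by decide, Bool.false_and]
      rw [ih _ _ (fun p hp => h p (List.mem_cons_of_mem _ hp))]
      simp only [mapFlag, List.map_cons, List.length_cons, beq_self_eq_true, if_true]
      rw [List.append_cons arr, show k + (xs.length + 1) = k + 1 + xs.length from by omega]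
      simp

lemma goA_post (v : List (String × String)) (arr : List (String × String × String))
    (nd : Int) (ifd : Option Int) (k : Nat) (h : 1 ≤ nd) :
    (goA v arr nd ifd k).1 = arr ++ mapFlag v ∧ (goA v arr nd ifd k).2.2 = ifd := by
  induction v generalizing arr nd k with
  | nil => simp [goA, mapFlag]
  | cons x xs ih =>
      obtain ⟨a, b⟩ := x
      by_cases hab : a = b
      · simp only [goA, hab, beq_self_eq_true, if_true,
          show (("EQ" : String) == "NEQ") = false from by decide, Bool.false_eq_true, if_false,
          Bool.and_false]
        have := ih (arr ++ [(b, b, "EQ")]) nd (k + 1) h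
        constructor
        · rw [this.1]
          simp [mapFlag]
        · exact this.2
      · have hne : (a == b) = false := by simpa using hab
        have hnd : ((nd + 1 : Int) == 1) = false := by
          rw [beq_eq_false_iff_ne]; omega
        simp only [goA, hne, Bool.false_eq_true, if_false, beq_self_eq_true, if_true, hnd,
          Bool.false_and]
        have := ih (arr ++ [(a, b, "NEQ")]) (nd + 1) (k + 1) (by omega)
        constructor
        · rw [this.1]
          simp [mapFlag]
          exact hab
        · exact this.2

lemma goA_split (u v : List (String × String)) (a b : String)
    (hu : ∀ p ∈ u, p.1 = p.2) (hab : a ≠ b) :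
    (goA (u ++ (a, b) :: v) [] 0 none 0).1 = mapFlag u ++ (a, b, "NE1") :: mapFlag v ∧
    (goA (u ++ (a, b) :: v) [] 0 none 0).2.2 = some (u.length : Int) := by
  rw [goA_prefix u _ _ _ hu]
  have hne : (a == b) = false := by simpa using hab
  simp only [goA, hne, Bool.false_eq_true, if_false, beq_self_eq_true, if_true,
    show ((0 + 1 : Int) == 1) = true from by decide, Bool.true_and, Nat.zero_add]
  have hp := goA_post v ((([] : List (String × String × String)) ++ mapFlag u) ++ [(a, b, "NE1")])
    (0 + 1) (some ((u.length : Nat) : Int)) (u.length + 1) (by omega)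
  constructor
  · rw [hp.1]
    simp
  · rw [hp.2]

lemma filter_zipIdx_eq_nil (u : List (String × String)) (k : Nat)
    (h : ∀ p ∈ u, p.1 = p.2) :
    ((mapFlag u).zipIdx k).filter (fun t => t.1.2.2 == "NEQ") = [] := by
  induction u generalizing k with
  | nil => simp [mapFlag]
  | cons x xs ih =>
      obtain ⟨a, b⟩ := x
      have hab : a = b := h (a, b) (by simp)
      simp only [mapFlag, List.map_cons, List.zipIdx_cons, List.filter_cons, hab,
        beq_self_eq_true, if_true, show (("EQ" : String) == "NEQ") = false from by decide,
        Bool.false_eq_true, if_false]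
      simpa [mapFlag] using ih (k + 1) (fun p hp => h p (List.mem_cons_of_mem _ hp))

lemma dropWhile_cons_pred_false {α : Type} (p : α → Bool) :
    ∀ (l : List α) {x : α} {xs : List α}, l.dropWhile p = x :: xs → p x = false := by
  intro l
  induction l with
  | nil => intro x xs h; simp at h
  | cons y ys ih =>
      intro x xs h
      rw [List.dropWhile_cons] at h
      split at h
      · exact ih h
      · next hpy =>
          cases h
          simpa using hpy

lemma alt_eq (list1 list2 : List String) (u v : List (String × String)) (a b : String)
    (hpr : ((list1 ++ List.replicate (max list1.length list2.length - list1.length) "NA").zip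
            (list2 ++ List.replicate (max list1.length list2.length - list2.length) "NA"))
           = u ++ (a, b) :: v)
    (hu : ∀ p ∈ u, p.1 = p.2) (hab : a ≠ b) :
    write_changes_1_helper_alt list1 list2
      = (mapFlag u ++ (a, b, "NE1") :: mapFlag v, (u.length : Int)) := by
  have hne : (a == b) = false := by simpa using hab
  have hmap : (u ++ (a, b) :: v).map
      (fun p => (p.1, p.2, if p.1 == p.2 then ("EQ" : String) else "NEQ"))
      = mapFlag u ++ (a, b, "NEQ") :: mapFlag v := by
    simp only [mapFlag, List.map_append, List.map_cons, hne, Bool.false_eq_true, if_false]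
  have hfil : ((mapFlag u ++ (a, b, "NEQ") :: mapFlag v).zipIdx 0).filter
      (fun t => t.1.2.2 == "NEQ")
      = ((a, b, "NEQ"), 0 + (mapFlag u).length) ::
        (((mapFlag v).zipIdx (0 + (mapFlag u).length + 1)).filter (fun t => t.1.2.2 == "NEQ")) := by
    rw [List.zipIdx_append, List.filter_append, filter_zipIdx_eq_nil u 0 hu,
      List.zipIdx_cons, List.filter_cons]
    simp
  have hset : (mapFlag u ++ (a, b, "NEQ") :: mapFlag v).set (0 + (mapFlag u).length)
      (a, b, "NE1") = mapFlag u ++ (a, b, "NE1") :: mapFlag v := by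
    rw [List.set_append]
    simp
  show (match ((list1 ++ List.replicate (max list1.length list2.length - list1.length)
        "NA").zip (list2 ++ List.replicate (max list1.length list2.length - list2.length)
        "NA")).map (fun p => (p.1, p.2, if p.1 == p.2 then ("EQ" : String) else "NEQ"))
        |>.zipIdx.filter (fun t => t.1.2.2 == "NEQ") with
    | [] => (_, (0 : Int))
    | ((a1, a2, _), i) :: _ => (_, (i : Int))) = _
  rw [hpr, hmap]
  rw [show ((mapFlag u ++ (a, b, "NEQ") :: mapFlag v).zipIdx
      = (mapFlag u ++ (a, b, "NEQ") :: mapFlag v).zipIdx 0) from rfl, hfil]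
  simp only [hset]
  simp [mapFlag]

-- ===== VERDICT (by name: the statement is the Claim_ definition above) =====
theorem write_changes_1_helper_spec : Claim_equal_write_changes_1_helper := by
  intro list1 list2 _hdom hpre
  unfold Spec_write_changes_1_helper
  unfold Pre_write_changes_1_helper at hpre
  rw [List.any_eq_true] at hpre
  obtain ⟨x, hx, hxne⟩ := hpre
  cases hdw : (((list1 ++ List.replicate (max list1.length list2.length - list1.length) "NA").zip
      (list2 ++ List.replicate (max list1.length list2.length - list2.length) "NA")).dropWhile
        (fun p => p.1 == p.2)) with
  | nil =>
      exfalso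
      rw [List.dropWhile_eq_nil_iff] at hdw
      have hxeq := hdw x hx
      simp only [bne] at hxne
      rw [hxeq] at hxne
      simp at hxne
  | cons hdp tl =>
      obtain ⟨a, b⟩ := hdp
      have hpr : ((list1 ++ List.replicate (max list1.length list2.length - list1.length) "NA").zip
          (list2 ++ List.replicate (max list1.length list2.length - list2.length) "NA"))
          = (((list1 ++ List.replicate (max list1.length list2.length - list1.length) "NA").zip
            (list2 ++ List.replicate (max list1.length list2.length - list2.length) "NA")).takeWhile
              (fun p => p.1 == p.2)) ++ (a, b) :: tl := by
        rw [← hdw]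
        exact (List.takeWhile_append_dropWhile).symm
      have hu : ∀ p ∈ (((list1 ++ List.replicate (max list1.length list2.length - list1.length)
          "NA").zip (list2 ++ List.replicate (max list1.length list2.length - list2.length)
          "NA")).takeWhile (fun p => p.1 == p.2)), p.1 = p.2 := by
        intro p hp
        simpa using List.mem_takeWhile_imp hp
      have hab : a ≠ b := by
        simpa using dropWhile_cons_pred_false (fun (p : String × String) => p.1 == p.2) _ hdw
      rw [foldA_eq_goA]
      rw [show ((pad list1 (max list1.length list2.length)).zip
            (pad list2 (max list1.length list2.length)))
          = (((list1 ++ List.replicate (max list1.length list2.length - list1.length) "NA").zip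
            (list2 ++ List.replicate (max list1.length list2.length - list2.length) "NA")).takeWhile
              (fun p => p.1 == p.2)) ++ (a, b) :: tl from hpr]
      have hA := goA_split _ tl a b hu hab
      rw [alt_eq list1 list2 _ tl a b hpr hu hab]
      refine Prod.ext ?_ ?_
      · exact hA.1
      · rw [hA.2]
        rfl
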